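-- pv_equiv track=rewrite | github.com/KoSv/schillinger | schillinger/harmony.py | chordify_scale
-- ===== SOURCE A (Python) =====
-- def chordify_scale(scala, voices):
--     '''
--             chordify_scale(['C', 'E-', 'G', 'B-', 'D', 'F', 'A-'],4)
--             >>> [['C', 'E-', 'G', 'B-'], ['E-', 'G', 'B-', 'D'], ['G', 'B-', 'D', 'F'], ...]
--     '''
--     new_list=[]
--     for r in range(len(scala)):
--         l = []
--         for d in range(voices):
--             l.append(scala[(r+d)%len(scala)])
--         new_list.append(l)
--     return new_list
-- ===== SOURCE B (Python) =====
-- def chordify_scale(scala, voices):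
--     if not scala:
--         return []
--     n = len(scala)
--     v = max(voices, 0)
--     ext = scala * ((v // n) + 2)
--     return [ext[r:r + v] for r in range(n)]
-- ===== Notes on version B (the rewrite author's own statement) =====
-- stated objective: faster
-- what changed: Replaces the nested loop with per-element modular indexing scala[(r+d)%len] by precomputing one repeated list ext = scala * (max(voices,0)//len + 2) and taking each chord as a single contiguous slice ext[r:r+v], so the inner Python-level loop and modulo disappear into C-level list repetition and slicing.
import Mathlib
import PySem

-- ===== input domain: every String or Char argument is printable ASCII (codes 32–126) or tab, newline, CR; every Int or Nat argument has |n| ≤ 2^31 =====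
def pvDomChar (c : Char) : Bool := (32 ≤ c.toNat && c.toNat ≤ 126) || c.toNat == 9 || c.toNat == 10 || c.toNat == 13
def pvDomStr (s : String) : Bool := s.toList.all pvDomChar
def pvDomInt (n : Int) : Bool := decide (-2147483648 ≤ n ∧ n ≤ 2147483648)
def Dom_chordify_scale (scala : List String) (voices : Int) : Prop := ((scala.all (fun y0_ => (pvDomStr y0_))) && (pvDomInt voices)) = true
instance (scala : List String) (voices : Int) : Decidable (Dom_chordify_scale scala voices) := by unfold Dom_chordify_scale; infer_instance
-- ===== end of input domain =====

-- B replaces the modular inner loop by slicing a precomputed repeated list (alternative decomposition).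

-- ===== PORT A =====
-- literal port: outer loop over range(len(scala)), inner loop appending scala[(r+d) % len(scala)]
def chordify_scale (scala : List String) (voices : Int) : List (List String) :=
  (PySem.List.pyRange 0 (scala.length : Int) 1).foldl
    (fun new_list r =>
      new_list ++
        [(PySem.List.pyRange 0 voices 1).foldl
          (fun l d => l ++ [PySem.List.pyGetD scala (PySem.Int.mod (r + d) (scala.length : Int)) ""]) []])
    []

-- ===== PORT B =====
-- literal port of Source B: empty guard, v = max(voices, 0), ext = scala * (v//n + 2), chords are slices
def chordify_scale_alt (scala : List String) (voices : Int) : List (List String) :=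
  if scala = [] then []
  else
    let n : Int := scala.length
    let v : Int := max voices 0
    let ext : List String := (List.replicate (PySem.Int.floordiv v n + 2).toNat scala).flatten
    (PySem.List.pyRange 0 n 1).map (fun r => PySem.List.slice ext (some r) (some (r + v)))

-- ===== PRECONDITION & SPEC =====
def Spec_chordify_scale (scala : List String) (voices : Int) (out : List (List String)) : Prop := out = chordify_scale_alt scala voices
instance (scala : List String) (voices : Int) (out : List (List String)) : Decidable (Spec_chordify_scale scala voices out) := by unfold Spec_chordify_scale; infer_instance

-- ===== CLAIM (what is proved, stated in full; the proofs are below) =====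
def Claim_equal_chordify_scale : Prop := ∀ (scala : List String) (voices : Int), Dom_chordify_scale scala voices → Spec_chordify_scale scala voices (chordify_scale scala voices)

-- ===== LEMMAS AND PROOFS =====

-- getElem? of a flattened replicate: position j reads xs[j % xs.length] while j < k * xs.length
lemma getElem?_flatten_replicate {α : Type} (xs : List α) (k j : Nat) :
    ((List.replicate k xs).flatten)[j]? = if j < k * xs.length then xs[j % xs.length]? else none := by
  induction k generalizing j with
  | zero => simp
  | succ k ih =>
    simp only [List.replicate_succ, List.flatten_cons, List.getElem?_append]
    have hsm : (k + 1) * xs.length = k * xs.length + xs.length := by ring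
    by_cases hj : j < xs.length
    · rw [if_pos hj, if_pos (by omega), Nat.mod_eq_of_lt hj]
    · have hx : xs.length ≤ j := by omega
      rw [if_neg hj, ih (j - xs.length), Nat.mod_eq_sub_mod hx]
      by_cases h1 : j - xs.length < k * xs.length
      · rw [if_pos h1, if_pos (by omega)]
      · rw [if_neg h1, if_neg (by omega)]

-- ===== VERDICT (by name: the statement is the Claim_ definition above) =====
theorem chordify_scale_spec : Claim_equal_chordify_scale := by
  intro scala voices _
  show chordify_scale scala voices = chordify_scale_alt scala voices
  unfold chordify_scale chordify_scale_alt
  by_cases hnil : scala = []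
  · subst hnil; simp [PySem.List.pyRange_zero]
  · rw [if_neg hnil]
    have hn : 0 < scala.length := List.length_pos_iff.mpr hnil
    rw [PySem.List.foldl_append_singleton_eq_map, List.nil_append]
    apply List.map_congr_left
    intro r hr
    rw [PySem.List.mem_pyRange_one] at hr
    obtain ⟨hr0, hrn⟩ := hr
    set n : Int := (scala.length : Int) with hn'
    set v : Int := max voices 0 with hv
    have hv0 : 0 ≤ v := le_max_right _ _
    -- the inner append-loop is a map, and range(voices) = range(v)
    rw [PySem.List.foldl_append_singleton_eq_map, List.nil_append]
    have hrange : PySem.List.pyRange 0 voices 1 = PySem.List.pyRange 0 v 1 := by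
      by_cases h : voices ≤ 0
      · rw [PySem.List.pyRange_one_eq_nil h, PySem.List.pyRange_one_eq_nil (by omega)]
      · have : v = voices := by omega
        rw [this]
    rw [hrange, PySem.List.slice_toNat _ hr0 (by omega)]
    set k : Nat := (PySem.Int.floordiv v n + 2).toNat with hk
    set ext : List String := (List.replicate k scala).flatten with hext
    have hfl : 0 ≤ PySem.Int.floordiv v n := by
      rw [PySem.Int.floordiv_eq_ediv_of_pos (by omega)]
      exact Int.ediv_nonneg hv0 (by omega)
    -- the extension is long enough: v + n ≤ k * n
    have hvk : v.toNat + scala.length ≤ k * scala.length := by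
      have hdiv : PySem.Int.floordiv v n * n ≤ v ∧ v < (PySem.Int.floordiv v n + 1) * n :=
        (PySem.Int.floordiv_eq_iff_of_pos (by omega)).mp rfl
      have hklen : (k : Int) * n = (PySem.Int.floordiv v n + 2) * n := by
        rw [hk]
        push_cast [Int.toNat_of_nonneg (by omega : (0:Int) ≤ PySem.Int.floordiv v n + 2)]
        ring
      have hmain : (v.toNat : Int) + n ≤ (k : Int) * n := by
        rw [hklen, Int.toNat_of_nonneg hv0]
        nlinarith [hdiv.2]
      have hcast : ((k * scala.length : Nat) : Int) = (k : Int) * n := by push_cast; rfl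
      omega
    -- pointwise equality of the two chords
    apply List.ext_getElem?
    intro i
    rw [List.getElem?_map, PySem.List.getElem?_pyRange_one, List.getElem?_take]
    have harith : (r + v).toNat - r.toNat = v.toNat := by omega
    rw [harith]
    by_cases hi : i < v.toNat
    · rw [if_pos (by omega), if_pos hi, List.getElem?_drop]
      rw [hext, getElem?_flatten_replicate]
      rw [if_pos (by omega : r.toNat + i < k * scala.length)]
      have hmodeq : PySem.Int.mod (r + (0 + (i : Int))) n = (((r.toNat + i) % scala.length : Nat) : Int) := by
        have h1 : r + (0 + (i : Int)) = ((r.toNat + i : Nat) : Int) := by omega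
        rw [h1, hn', PySem.Int.mod_natCast]
      simp only [Option.map, hmodeq, PySem.List.pyGetD_natCast]
      have hlt : (r.toNat + i) % scala.length < scala.length := Nat.mod_lt _ hn
      rw [List.getD_eq_getElem?_getD, List.getElem?_eq_getElem hlt]
      rfl
    · rw [if_neg (by omega), if_neg hi]
      rfl
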